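-- pv_equiv track=rewrite | github.com/TB-AD/TB-Bench | evaluation/evaluate_functions.py | other_lane_changing_score
-- ===== SOURCE A (Python) =====
-- def other_lane_changing_score(pred, short_gt):
--     no_change_list = ['maintains its lane', 'maintaining its lane', 'no change', 'go straight', 'straight']
--     left_lane_change_list = ['change to the left lane', 'changes to the left lane', 'changes to the left', 'change to the left', 'left lane change', "from the right to the left", "transitions to the left"]
--     right_lane_change_list = ['change to the right lane',  'changes to the right lane','changes to the right','change to the right', 'right lane change', "from the left to the right", "transitions to the right"]
--
--     no_change_matches = 1 if sum(word in pred for word in no_change_list) >= 1 else 0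
--     left_change_matches = 1 if sum(word in pred for word in left_lane_change_list) >= 1 else 0
--     right_change_matches = 1 if sum(word in pred for word in right_lane_change_list) >= 1 else 0
--
--     total_matches = no_change_matches + left_change_matches + right_change_matches
--     # Check for cheating or multiple matches
--     if total_matches != 1:
--         return 0  # Multiple matches or no match indicates cheating or incorrect prediction
--
--     if short_gt == 'no_change':
--         return 1 if no_change_matches == 1 else 0
--     elif short_gt == 'left_lane_change':
--         return 1 if left_change_matches == 1 else 0
--     elif short_gt == 'right_lane_change':
--         return 1 if right_change_matches == 1 else 0
--     return 0
-- ===== SOURCE B (Python) =====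
-- def other_lane_changing_score(pred, short_gt):
--     no_words = ['maintains its lane', 'maintaining its lane', 'no change', 'go straight', 'straight']
--     left_words = ['change to the left lane', 'changes to the left lane', 'changes to the left', 'change to the left', 'left lane change', "from the right to the left", "transitions to the left"]
--     right_words = ['change to the right lane', 'changes to the right lane', 'changes to the right', 'change to the right', 'right lane change', "from the left to the right", "transitions to the right"]
--     pairs = ([(w, 'no_change') for w in no_words]
--              + [(w, 'left_lane_change') for w in left_words]
--              + [(w, 'right_lane_change') for w in right_words])
--     found = None
--     for w, cat in pairs:
--         if w in pred:
--             if found is None: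
--                 found = cat
--             elif found != cat:
--                 return 0  # a second distinct category matched: abort immediately
--     return 1 if found == short_gt else 0
-- ===== Notes on version B (the rewrite author's own statement) =====
-- stated objective: alternative
-- what changed: Replaces A's three staged per-category 0/1 counts plus an if/elif dispatch on short_gt by a single early-exit pass over one flat (keyword, category) list that tracks the unique matched category in an accumulator and ends with one equality test against short_gt.
import Mathlib
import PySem

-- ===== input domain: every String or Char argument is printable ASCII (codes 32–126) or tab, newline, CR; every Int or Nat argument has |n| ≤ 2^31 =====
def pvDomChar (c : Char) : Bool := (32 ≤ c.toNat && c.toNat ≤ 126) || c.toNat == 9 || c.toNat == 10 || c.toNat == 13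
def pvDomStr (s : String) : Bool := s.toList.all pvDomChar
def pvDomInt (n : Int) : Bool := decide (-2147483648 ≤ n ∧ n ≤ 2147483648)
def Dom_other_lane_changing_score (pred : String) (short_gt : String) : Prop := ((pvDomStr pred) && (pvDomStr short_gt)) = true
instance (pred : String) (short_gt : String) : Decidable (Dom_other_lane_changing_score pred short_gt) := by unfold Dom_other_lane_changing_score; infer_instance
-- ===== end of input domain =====

-- B replaces A's three staged per-category counts and if/elif dispatch by one early-exit
-- pass over a flat (keyword, category) list tracking the unique matched category (objective: alternative).

-- ===== PORT A =====
def other_lane_changing_score (pred : String) (short_gt : String) : Int :=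
  let no_change_list := ["maintains its lane", "maintaining its lane", "no change", "go straight", "straight"]
  let left_lane_change_list := ["change to the left lane", "changes to the left lane", "changes to the left", "change to the left", "left lane change", "from the right to the left", "transitions to the left"]
  let right_lane_change_list := ["change to the right lane", "changes to the right lane", "changes to the right", "change to the right", "right lane change", "from the left to the right", "transitions to the right"]
  let no_change_matches : Int := if 1 ≤ (no_change_list.map (fun w => if PySem.Str.isIn w pred then (1:Int) else 0)).sum then 1 else 0
  let left_change_matches : Int := if 1 ≤ (left_lane_change_list.map (fun w => if PySem.Str.isIn w pred then (1:Int) else 0)).sum then 1 else 0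
  let right_change_matches : Int := if 1 ≤ (right_lane_change_list.map (fun w => if PySem.Str.isIn w pred then (1:Int) else 0)).sum then 1 else 0
  let total_matches := no_change_matches + left_change_matches + right_change_matches
  if total_matches ≠ 1 then 0
  else if short_gt == "no_change" then (if no_change_matches == 1 then 1 else 0)
  else if short_gt == "left_lane_change" then (if left_change_matches == 1 then 1 else 0)
  else if short_gt == "right_lane_change" then (if right_change_matches == 1 then 1 else 0)
  else 0

-- ===== PORT B =====
-- the for-loop of Source B with its early 'return 0' and the final comparison, as structural recursion
def olcsGo (pred short_gt : String) : List (String × String) → Option String → Int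
  | [], found => if found == some short_gt then 1 else 0
  | (w, cat) :: rest, found =>
    if PySem.Str.isIn w pred then
      match found with
      | none => olcsGo pred short_gt rest (some cat)
      | some f => if f ≠ cat then 0 else olcsGo pred short_gt rest (some f)
    else olcsGo pred short_gt rest found

def other_lane_changing_score_alt (pred : String) (short_gt : String) : Int :=
  let no_words := ["maintains its lane", "maintaining its lane", "no change", "go straight", "straight"]
  let left_words := ["change to the left lane", "changes to the left lane", "changes to the left", "change to the left", "left lane change", "from the right to the left", "transitions to the left"]
  let right_words := ["change to the right lane", "changes to the right lane", "changes to the right", "change to the right", "right lane change", "from the left to the right", "transitions to the right"]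
  let pairs := no_words.map (fun w => (w, "no_change"))
              ++ left_words.map (fun w => (w, "left_lane_change"))
              ++ right_words.map (fun w => (w, "right_lane_change"))
  olcsGo pred short_gt pairs none

-- ===== PRECONDITION & SPEC =====
def Spec_other_lane_changing_score (pred : String) (short_gt : String) (out : Int) : Prop := out = other_lane_changing_score_alt pred short_gt
instance (pred : String) (short_gt : String) (out : Int) : Decidable (Spec_other_lane_changing_score pred short_gt out) := by unfold Spec_other_lane_changing_score; infer_instance

-- ===== CLAIM (what is proved, stated in full; the proofs are below) =====
def Claim_equal_other_lane_changing_score : Prop := ∀ (pred : String) (short_gt : String), Dom_other_lane_changing_score pred short_gt → Spec_other_lane_changing_score pred short_gt (other_lane_changing_score pred short_gt)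

-- ===== LEMMAS AND PROOFS =====

-- A's 0/1 flag 'sum(word in pred …) >= 1' is the boolean 'any word in pred' as 0/1.
theorem flag_eq_any (ws : List String) (pred : String) :
    (if 1 ≤ (ws.map (fun w => if PySem.Str.isIn w pred then (1:Int) else 0)).sum then (1:Int) else 0)
      = if ws.any (fun w => PySem.Str.isIn w pred) then 1 else 0 := by
  induction ws with
  | nil => simp
  | cons h t ih =>
    have hnn : 0 ≤ (t.map (fun w => if PySem.Str.isIn w pred then (1:Int) else 0)).sum := by
      apply List.sum_nonneg; intro x hx
      obtain ⟨w, _, rfl⟩ := List.mem_map.mp hx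
      split <;> omega
    cases hh : PySem.Str.isIn h pred with
    | true =>
      simp only [List.map_cons, List.sum_cons, List.any_cons, hh, if_true, Bool.true_or]
      rw [if_pos (by omega)]
    | false =>
      rw [List.map_cons, List.sum_cons, List.any_cons, hh]
      simpa using ih

-- running olcsGo across one category segment only depends on whether any word of it matched
theorem olcsGo_segment (pred short_gt : String) (ws : List String) (c : String)
    (rest : List (String × String)) (found : Option String) :
    olcsGo pred short_gt (ws.map (fun w => (w, c)) ++ rest) found
      = if ws.any (fun w => PySem.Str.isIn w pred) then
          match found with
          | none => olcsGo pred short_gt rest (some c)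
          | some f => if f ≠ c then 0 else olcsGo pred short_gt rest (some f)
        else olcsGo pred short_gt rest found := by
  induction ws generalizing found with
  | nil => cases found <;> simp
  | cons w t ih =>
    simp only [List.map_cons, List.cons_append, List.any_cons, olcsGo]
    by_cases hw : PySem.Str.isIn w pred = true
    · simp only [hw, if_true, Bool.true_or]
      cases found with
      | none =>
        rw [ih (some c)]
        cases t.any (fun w => PySem.Str.isIn w pred) <;> simp
      | some f =>
        by_cases hf : f = c
        · subst hf
          simp only [ne_eq, not_true_eq_false, if_false]
          rw [ih (some f)]
          cases t.any (fun w => PySem.Str.isIn w pred) <;> simp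
        · simp [hf]
    · simp only [Bool.not_eq_true] at hw
      simp only [hw, Bool.false_or]
      simpa using ih found

-- same, for the last segment (rest = [])
theorem olcsGo_segment_nil (pred short_gt : String) (ws : List String) (c : String)
    (found : Option String) :
    olcsGo pred short_gt (ws.map (fun w => (w, c))) found
      = if ws.any (fun w => PySem.Str.isIn w pred) then
          match found with
          | none => olcsGo pred short_gt [] (some c)
          | some f => if f ≠ c then 0 else olcsGo pred short_gt [] (some f)
        else olcsGo pred short_gt [] found := by
  have := olcsGo_segment pred short_gt ws c [] found
  simpa using this

-- the end-of-loop comparison 'found == short_gt' for found = some c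
theorem olcsGo_nil_some (pred short_gt c : String) :
    olcsGo pred short_gt [] (some c) = if short_gt = c then 1 else 0 := by
  simp only [olcsGo]
  by_cases h : short_gt = c
  · subst h; simp
  · have hb : (some c == some short_gt) = false :=
      beq_eq_false_iff_ne.mpr (fun hc => h (Option.some.inj hc).symm)
    simp [hb, h]

-- B's value as a decision tree over the three per-category 'any keyword matched' booleans
theorem alt_char (pred short_gt : String) :
    other_lane_changing_score_alt pred short_gt
      = (let a0 := ["maintains its lane", "maintaining its lane", "no change", "go straight", "straight"].any (fun w => PySem.Str.isIn w pred)
         let a1 := ["change to the left lane", "changes to the left lane", "changes to the left", "change to the left", "left lane change", "from the right to the left", "transitions to the left"].any (fun w => PySem.Str.isIn w pred)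
         let a2 := ["change to the right lane", "changes to the right lane", "changes to the right", "change to the right", "right lane change", "from the left to the right", "transitions to the right"].any (fun w => PySem.Str.isIn w pred)
         if a0 then (if a1 then 0 else if a2 then 0 else (if short_gt = "no_change" then 1 else 0))
         else if a1 then (if a2 then 0 else (if short_gt = "left_lane_change" then 1 else 0))
         else if a2 then (if short_gt = "right_lane_change" then 1 else 0)
         else 0) := by
  simp only [other_lane_changing_score_alt]
  rw [List.append_assoc]
  simp only [olcsGo_segment, olcsGo_segment_nil]
  cases h0 : ["maintains its lane", "maintaining its lane", "no change", "go straight", "straight"].any (fun w => PySem.Str.isIn w pred) <;>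
  cases h1 : ["change to the left lane", "changes to the left lane", "changes to the left", "change to the left", "left lane change", "from the right to the left", "transitions to the left"].any (fun w => PySem.Str.isIn w pred) <;>
  cases h2 : ["change to the right lane", "changes to the right lane", "changes to the right", "change to the right", "right lane change", "from the left to the right", "transitions to the right"].any (fun w => PySem.Str.isIn w pred) <;>
    simp [olcsGo_nil_some, olcsGo] <;>
    exact if_congr (Iff.intro Eq.symm Eq.symm) rfl rfl

-- ===== VERDICT (by name: the statement is the Claim_ definition above) =====
theorem other_lane_changing_score_spec : Claim_equal_other_lane_changing_score := by
  intro pred short_gt _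
  unfold Spec_other_lane_changing_score other_lane_changing_score
  rw [alt_char]
  simp only [flag_eq_any]
  cases h0 : ["maintains its lane", "maintaining its lane", "no change", "go straight", "straight"].any (fun w => PySem.Str.isIn w pred) <;>
  cases h1 : ["change to the left lane", "changes to the left lane", "changes to the left", "change to the left", "left lane change", "from the right to the left", "transitions to the left"].any (fun w => PySem.Str.isIn w pred) <;>
  cases h2 : ["change to the right lane", "changes to the right lane", "changes to the right", "change to the right", "right lane change", "from the left to the right", "transitions to the right"].any (fun w => PySem.Str.isIn w pred) <;>
    (by_cases e0 : short_gt = "no_change" <;>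
     by_cases e1 : short_gt = "left_lane_change" <;>
     by_cases e2 : short_gt = "right_lane_change" <;>
     simp_all)
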